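-- pv_equiv track=rewrite | github.com/superleesa/docs_format_checker | format.py | split_text_into_paragraphs
-- ===== SOURCE A (Python) =====
-- def split_text_into_paragraphs(text):
--     # inclusive start and exlusive end
--     paragraphs = [[0]]
--     for idx in range(len(text)):
--         if text[idx] == "\n":
--             paragraphs[-1].append(idx)
--             paragraphs.append([idx + 1])
--
--     paragraphs[-1].append(len(text))
--     return paragraphs
-- ===== SOURCE B (Python) =====
-- def split_text_into_paragraphs(text):
--     bounds = [-1] + [i for i, c in enumerate(text) if c == "\n"] + [len(text)]
--     return [[a + 1, b] for a, b in zip(bounds, bounds[1:])]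
-- ===== Notes on version B (the rewrite author's own statement) =====
-- stated objective: simpler
-- what changed: Replaces A's single pass that mutates the last paragraph in place with an index-then-map decomposition: collect newline positions as bounds [-1]+positions+[len] and map consecutive bound pairs to [start,end] ranges.
import Mathlib
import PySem

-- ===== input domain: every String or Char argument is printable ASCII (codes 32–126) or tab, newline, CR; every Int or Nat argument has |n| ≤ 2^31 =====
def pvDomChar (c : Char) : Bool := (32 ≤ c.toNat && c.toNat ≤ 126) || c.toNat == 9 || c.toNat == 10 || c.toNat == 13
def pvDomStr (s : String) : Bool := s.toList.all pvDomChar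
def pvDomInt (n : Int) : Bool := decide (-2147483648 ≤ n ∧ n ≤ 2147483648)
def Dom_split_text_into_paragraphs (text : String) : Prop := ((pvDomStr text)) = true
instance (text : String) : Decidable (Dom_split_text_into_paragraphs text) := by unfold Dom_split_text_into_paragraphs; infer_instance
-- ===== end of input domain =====

-- B differs from A by decomposition: it collects the newline positions first and maps
-- consecutive bound pairs to ranges, instead of A's single pass mutating the last paragraph.
-- Objective: simpler (index-then-map, no mutation); same return value, proved equal below.

-- ===== PORT A =====
-- paragraphs[-1].append(x)
def pvAppendLast (ps : List (List Int)) (x : Int) : List (List Int) :=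
  ps.dropLast ++ [(ps.getLast?.getD []) ++ [x]]

-- one iteration of A's loop body at index idx
def pvStepA (cs : List Char) (ps : List (List Int)) (idx : Nat) : List (List Int) :=
  if cs[idx]? = some '\n' then pvAppendLast ps (idx : Int) ++ [[(idx : Int) + 1]] else ps

def split_text_into_paragraphs (text : String) : List (List Int) :=
  let cs := text.toList
  let ps := (List.range cs.length).foldl (pvStepA cs) [[0]]
  pvAppendLast ps (cs.length : Int)

-- ===== PORT B =====
def split_text_into_paragraphs_alt (text : String) : List (List Int) :=
  let cs := text.toList
  let bounds : List Int :=
    -1 :: ((PySem.List.enumerate cs).filter (fun p => p.2 == '\n')).map (fun p => p.1)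
      ++ [(cs.length : Int)]
  (bounds.zip (bounds.drop 1)).map (fun p => [p.1 + 1, p.2])

-- ===== PRECONDITION & SPEC =====
def Spec_split_text_into_paragraphs (text : String) (out : List (List Int)) : Prop := out = split_text_into_paragraphs_alt text
instance (text : String) (out : List (List Int)) : Decidable (Spec_split_text_into_paragraphs text out) := by unfold Spec_split_text_into_paragraphs; infer_instance

-- ===== CLAIM (what is proved, stated in full; the proofs are below) =====
def Claim_equal_split_text_into_paragraphs : Prop := ∀ (text : String), Dom_split_text_into_paragraphs text → Spec_split_text_into_paragraphs text (split_text_into_paragraphs text)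

-- ===== LEMMAS AND PROOFS =====

-- B's pair map, as a named function for the proofs
def pvPairs (b : List Int) : List (List Int) :=
  (b.zip (b.drop 1)).map (fun p => [p.1 + 1, p.2])

-- newline positions of cs
def pvPos (cs : List Char) : List Int :=
  ((PySem.List.enumerate cs).filter (fun p => p.2 == '\n')).map (fun p => p.1)

lemma pvPairs_cons_cons (a b : Int) (t : List Int) :
    pvPairs (a :: b :: t) = [a + 1, b] :: pvPairs (b :: t) := by
  simp [pvPairs]

lemma pvPairs_append (a x : Int) : ∀ (b : List Int),
    pvPairs (a :: (b ++ [x])) = pvPairs (a :: b) ++ [[b.getLastD a + 1, x]] := by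
  intro b
  induction b generalizing a with
  | nil => simp [pvPairs]
  | cons c t ih =>
      have h := ih c
      simp only [List.cons_append] at h ⊢
      rw [pvPairs_cons_cons a c (t ++ [x]), h, pvPairs_cons_cons a c t]
      cases t with
      | nil => simp
      | cons y ys =>
          obtain ⟨v, hv⟩ := Option.isSome_iff_exists.mp
            (List.getLast?_isSome.mpr (List.cons_ne_nil y ys))
          simp [hv]

lemma pvAppendLast_concat (ps : List (List Int)) (y : List Int) (x : Int) :
    pvAppendLast (ps ++ [y]) x = ps ++ [y ++ [x]] := by
  simp [pvAppendLast]

lemma pvPos_append_nl (cs : List Char) :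
    pvPos (cs ++ ['\n']) = pvPos cs ++ [((cs.length : Int))] := by
  simp [pvPos, PySem.List.enumerate, PySem.List.enumerate_append, List.filter_append]

lemma pvPos_append_other (cs : List Char) (c : Char) (h : c ≠ '\n') :
    pvPos (cs ++ [c]) = pvPos cs := by
  simp [pvPos, PySem.List.enumerate, PySem.List.enumerate_append, List.filter_append, h]

-- loop invariant: after the pass over cs, A's state is B's pairs over (-1 :: positions)
-- with the still-open last paragraph [last bound + 1]
lemma pvLoop_inv : ∀ (cs : List Char),
    (List.range cs.length).foldl (pvStepA cs) [[0]] =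
      pvPairs (-1 :: pvPos cs) ++ [[(pvPos cs).getLastD (-1) + 1]] := by
  intro cs
  induction cs using List.reverseRecOn with
  | nil => simp [pvPairs, pvPos, PySem.List.enumerate]
  | append_singleton cs c ih =>
      have hlen : (cs ++ [c]).length = cs.length + 1 := by simp
      rw [hlen, List.range_succ, List.foldl_append]
      have hcongr : (List.range cs.length).foldl (pvStepA (cs ++ [c])) [[0]] =
          (List.range cs.length).foldl (pvStepA cs) [[0]] := by
        apply PySem.List.foldl_congr_mem
        intro acc i hi
        have hlt : i < cs.length := List.mem_range.mp hi
        simp [pvStepA, List.getElem?_append_left hlt]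
      rw [List.foldl_cons, List.foldl_nil, hcongr, ih]
      have hget : (cs ++ [c])[cs.length]? = some c := by simp
      by_cases hc : c = '\n'
      · subst hc
        simp only [pvStepA]
        rw [if_pos hget, pvAppendLast_concat, pvPos_append_nl, pvPairs_append]
        simp
      · simp only [pvStepA]
        rw [if_neg (by simp [hc]), pvPos_append_other cs c hc]

-- B's port, written with the named helpers (definitional)
lemma pvAlt_eq (text : String) :
    split_text_into_paragraphs_alt text =
      pvPairs (-1 :: (pvPos text.toList ++ [(text.toList.length : Int)])) := rfl

-- ===== VERDICT (by name: the statement is the Claim_ definition above) =====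
theorem split_text_into_paragraphs_spec : Claim_equal_split_text_into_paragraphs := by
  intro text _
  show split_text_into_paragraphs text = split_text_into_paragraphs_alt text
  rw [pvAlt_eq]
  show pvAppendLast ((List.range text.toList.length).foldl (pvStepA text.toList) [[0]])
      (text.toList.length : Int) = _
  rw [pvLoop_inv, pvAppendLast_concat, pvPairs_append]
  simp
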